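-- pv_equiv track=rewrite | github.com/KhouloudSassiKs/4_week_algo_challenge_python | my-file-wed-jan-26.py | solution
-- ===== SOURCE A (Python) =====
-- def solution(grid):
--     if not grid:
--         return [None, None]
--
--     rows = len(grid)
--     cols = len(grid[0])
--     max = min = grid[0][cols - 1]
--     row = 1
--     col = cols - 2
--
--     while row < rows and col >= 0:
--         if grid[row][col] < min:
--             min = grid[row][col]
--         elif grid[row][col] > max:
--             max = grid[row][col]
--
--         row += 1
--         col -= 1
--
--     return [min, max]
-- ===== SOURCE B (Python) =====
-- def solution(grid):
--     if not grid:
--         return [None, None]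
--     cols = len(grid[0])
--     diag = sorted(grid[r][cols - 1 - r] for r in range(min(len(grid), cols)))
--     return [diag[0], diag[-1]]
-- ===== Notes on version B (the rewrite author's own statement) =====
-- stated objective: alternative
-- what changed: Replaces A's single while-loop tracking running min/max with branch updates by collecting the anti-diagonal, sorting it, and returning its first and last elements.
import Mathlib
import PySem

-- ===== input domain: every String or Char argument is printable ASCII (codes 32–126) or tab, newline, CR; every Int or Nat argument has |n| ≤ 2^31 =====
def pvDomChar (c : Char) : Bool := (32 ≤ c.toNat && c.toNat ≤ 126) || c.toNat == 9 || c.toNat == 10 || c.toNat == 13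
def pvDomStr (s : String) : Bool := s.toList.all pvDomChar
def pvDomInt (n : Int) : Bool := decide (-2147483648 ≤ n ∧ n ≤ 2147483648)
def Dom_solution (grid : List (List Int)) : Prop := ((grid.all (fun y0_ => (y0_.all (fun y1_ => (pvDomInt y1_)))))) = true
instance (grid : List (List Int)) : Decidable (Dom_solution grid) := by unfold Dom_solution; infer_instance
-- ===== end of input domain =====

-- B replaces A's single tracking loop (running min/max with branch updates) by sorting the
-- anti-diagonal and returning its first and last elements (alternative algorithm, O(k log k)).

-- ===== PORT A =====
-- the while loop of A: state (row, col, mn, mx)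
def solutionGo (grid : List (List Int)) (rows row col mn mx : Int) : Int × Int :=
  if _h : row < rows ∧ 0 ≤ col then
    let x := PySem.List.pyGetD (PySem.List.pyGetD grid row []) col 0
    if x < mn then solutionGo grid rows (row + 1) (col - 1) x mx
    else if x > mx then solutionGo grid rows (row + 1) (col - 1) mn x
    else solutionGo grid rows (row + 1) (col - 1) mn mx
  else (mn, mx)
termination_by (rows - row).toNat
decreasing_by all_goals omega

def solution (grid : List (List Int)) : List (Option Int) :=
  if grid = [] then [none, none]
  else
    let rows : Int := grid.length
    let cols : Int := (grid.headD []).length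
    -- grid[0][cols-1]; in range under Pre_ (Python raises IndexError when grid[0] is empty)
    let v := PySem.List.pyGetD (grid.headD []) (cols - 1) 0
    let p := solutionGo grid rows 1 (cols - 2) v v
    [some p.1, some p.2]

-- ===== PORT B =====
def solution_alt (grid : List (List Int)) : List (Option Int) :=
  if grid = [] then [none, none]
  else
    let cols : Int := (grid.headD []).length
    let n : Nat := min grid.length (grid.headD []).length
    let diag := (List.range n).map
      (fun (r : Nat) => PySem.List.pyGetD (PySem.List.pyGetD grid ((r : Nat) : Int) []) (cols - 1 - ((r : Nat) : Int)) 0)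
    let s := PySem.List.sorted diag (fun x => x) false
    -- diag[0] and diag[-1]; in range under Pre_ (Python raises IndexError on an empty diagonal)
    [some (PySem.List.pyGetD s 0 0), some (PySem.List.pyGetD s (-1) 0)]

-- ===== PRECONDITION & SPEC =====
-- Pre_ excludes exactly the inputs where Python A raises IndexError: a nonempty grid whose
-- first row is empty, or whose row r (for r on the anti-diagonal) is too short for index cols-1-r.
def Pre_solution (grid : List (List Int)) : Prop :=
  grid = [] ∨
    (grid.headD [] ≠ [] ∧
      ∀ r < min grid.length (grid.headD []).length,
        (grid.headD []).length - 1 - r < (grid.getD r []).length)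
instance (grid : List (List Int)) : Decidable (Pre_solution grid) := by unfold Pre_solution; infer_instance

def pvWitness_solution : List (List Int) := [[1, 2], [3, 4]]

def Spec_solution (grid : List (List Int)) (out : List (Option Int)) : Prop := out = solution_alt grid
instance (grid : List (List Int)) (out : List (Option Int)) : Decidable (Spec_solution grid out) := by unfold Spec_solution; infer_instance

-- ===== CLAIM (what is proved, stated in full; the proofs are below) =====
def Claim_equal_solution : Prop := ∀ (grid : List (List Int)), Dom_solution grid → Pre_solution grid → Spec_solution grid (solution grid)

-- ===== LEMMAS AND PROOFS =====

-- the anti-diagonal entry at row r, as both ports compute it (getD with default 0)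
def pvDiagEntry (grid : List (List Int)) (r : Nat) : Int :=
  (grid.getD r []).getD ((grid.headD []).length - 1 - r) 0

theorem pvGo_eq (grid : List (List Int)) (k : Nat) (hk : k = min grid.length (grid.headD []).length) :
    ∀ (fuel j : Nat) (mn mx : Int), fuel = k - j → mn ≤ mx →
      solutionGo grid (grid.length : Int) (j : Int) (((grid.headD []).length : Int) - 1 - (j : Int)) mn mx
        = (((List.range' j (k - j)).map (pvDiagEntry grid)).foldl min mn,
           ((List.range' j (k - j)).map (pvDiagEntry grid)).foldl max mx) := by
  intro fuel
  induction fuel with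
  | zero =>
    intro j mn mx hf _
    have hj : k ≤ j := by omega
    rw [solutionGo]
    have hcond : ¬ (((j : Nat) : Int) < (grid.length : Int) ∧ 0 ≤ ((grid.headD []).length : Int) - 1 - (j : Int)) := by
      rintro ⟨h1, h2⟩
      have : j < grid.length := by exact_mod_cast h1
      have : j < (grid.headD []).length := by omega
      omega
    rw [dif_neg hcond]
    have : k - j = 0 := by omega
    simp [this]
  | succ fuel ih =>
    intro j mn mx hf hmnmx
    by_cases hj : j < k
    · have hjr : j < grid.length := by omega
      have hjc : j < (grid.headD []).length := by omega
      rw [solutionGo]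
      have hcond : (((j : Nat) : Int) < (grid.length : Int) ∧ 0 ≤ ((grid.headD []).length : Int) - 1 - (j : Int)) := by
        constructor
        · exact_mod_cast hjr
        · omega
      rw [dif_pos hcond]
      have hx : PySem.List.pyGetD (PySem.List.pyGetD grid ((j : Nat) : Int) []) (((grid.headD []).length : Int) - 1 - (j : Int)) 0
          = pvDiagEntry grid j := by
        have hcast : ((grid.headD []).length : Int) - 1 - (j : Int) = (((grid.headD []).length - 1 - j : Nat) : Int) := by
          omega
        rw [hcast, PySem.List.pyGetD_natCast, PySem.List.pyGetD_natCast]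
        rfl
      have hrec : ∀ mn' mx' : Int, mn' ≤ mx' →
          solutionGo grid (grid.length : Int) ((j : Int) + 1) (((grid.headD []).length : Int) - 1 - (j : Int) - 1) mn' mx'
            = (((List.range' (j+1) (k - (j+1))).map (pvDiagEntry grid)).foldl min mn',
               ((List.range' (j+1) (k - (j+1))).map (pvDiagEntry grid)).foldl max mx') := by
        intro mn' mx' h
        have e1 : ((j : Int) + 1) = (((j + 1 : Nat)) : Int) := by push_cast; ring
        have e2 : (((grid.headD []).length : Int) - 1 - (j : Int) - 1)
            = (((grid.headD []).length : Int) - 1 - (((j + 1 : Nat)) : Int)) := by push_cast; ring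
        rw [e1, e2]
        exact ih (j + 1) mn' mx' (by omega) h
      have hsplit : k - j = (k - (j+1)) + 1 := by omega
      have hlist : List.range' j (k - j) = j :: List.range' (j + 1) (k - (j+1)) := by
        rw [hsplit, List.range'_succ]
      rw [hx, hlist]
      set x := pvDiagEntry grid j with hxdef
      simp only [List.map_cons, List.foldl_cons]
      by_cases h1 : x < mn
      · rw [if_pos h1, hrec x mx (by omega)]
        have : min mn x = x := by omega
        have h2 : max mx x = mx := by omega
        rw [this, h2]
      · rw [if_neg h1]
        by_cases h2 : x > mx
        · rw [if_pos h2, hrec mn x (by omega)]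
          have : min mn x = mn := by omega
          have h3 : max mx x = x := by omega
          rw [this, h3]
        · rw [if_neg h2, hrec mn mx hmnmx]
          have : min mn x = mn := by omega
          have h3 : max mx x = mx := by omega
          rw [this, h3]
    · -- j ≥ k: loop stops
      rw [solutionGo]
      have hcond : ¬ (((j : Nat) : Int) < (grid.length : Int) ∧ 0 ≤ ((grid.headD []).length : Int) - 1 - (j : Int)) := by
        rintro ⟨h1, h2⟩
        have : j < grid.length := by exact_mod_cast h1
        have : j < (grid.headD []).length := by omega
        omega
      rw [dif_neg hcond]
      have : k - j = 0 := by omega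
      simp [this]

-- diag[-1] of a nonempty list is its last element
theorem pvGetNegOne (l : List Int) (h : l ≠ []) : PySem.List.pyGetD l (-1) 0 = l.getLast h := by
  have hl : 0 < l.length := List.length_pos_iff.mpr h
  unfold PySem.List.pyGetD PySem.List.pyGet? PySem.List.pyIdx?
  have h1 : ¬ ((0:Int) ≤ -1) := by norm_num
  have h2 : -(l.length:Int) ≤ -1 := by omega
  simp only [if_neg h1, if_pos h2]
  have h3 : (-(-1:Int)).toNat = 1 := by decide
  rw [h3, List.getLast_eq_getElem]
  simp [List.getElem?_eq_getElem (by omega : l.length - 1 < l.length)]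

-- in a nondecreasing list every element is ≤ the last one
theorem pvLastGe (l : List Int) (hp : l.Pairwise (· ≤ ·)) (y : Int) (hy : y ∈ l) (h : l ≠ []) :
    y ≤ l.getLast h := by
  induction l with
  | nil => cases hy
  | cons a t ih =>
    rcases List.pairwise_cons.mp hp with ⟨ha, hpt⟩
    cases t with
    | nil => simp at hy; simp [hy]
    | cons b u =>
      rw [List.getLast_cons (by simp)]
      rcases List.mem_cons.mp hy with rfl | hyt
      · exact ha _ (List.getLast_mem _)
      · exact ih hpt hyt (by simp)

-- ===== VERDICT (by name: the statement is the Claim_ definition above) =====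
theorem solution_spec : Claim_equal_solution := by
  intro grid _ hpre
  unfold Spec_solution solution solution_alt
  by_cases hnil : grid = []
  · simp [hnil]
  · rw [if_neg hnil, if_neg hnil]
    rcases hpre with h | ⟨hhead, _⟩
    · exact absurd h hnil
    have hcols : 0 < (grid.headD []).length := List.length_pos_iff.mpr hhead
    set k : Nat := min grid.length (grid.headD []).length with hk
    have hk1 : 1 ≤ k := by
      have : 0 < grid.length := List.length_pos_iff.mpr hnil
      omega
    -- A's seed value equals the diagonal entry at row 0
    have hv : PySem.List.pyGetD (grid.headD []) (((grid.headD []).length : Int) - 1) 0 = pvDiagEntry grid 0 := by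
      have hcast : ((grid.headD []).length : Int) - 1 = (((grid.headD []).length - 1 : Nat) : Int) := by omega
      rw [hcast, PySem.List.pyGetD_natCast]
      unfold pvDiagEntry
      cases grid with
      | nil => exact absurd rfl hnil
      | cons g gs => rfl
    simp only [hv]
    -- B's diagonal list reduces to the mapped diagonal entries
    have hdiag : (List.range k).map
        (fun (r : Nat) => PySem.List.pyGetD (PySem.List.pyGetD grid ((r : Nat) : Int) []) (((grid.headD []).length : Int) - 1 - ((r : Nat) : Int)) 0)
        = (List.range k).map (pvDiagEntry grid) := by
      apply List.map_congr_left
      intro r hr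
      have hrk : r < k := List.mem_range.mp hr
      have hcast : ((grid.headD []).length : Int) - 1 - (r : Int) = (((grid.headD []).length - 1 - r : Nat) : Int) := by
        omega
      rw [hcast, PySem.List.pyGetD_natCast, PySem.List.pyGetD_natCast]
      rfl
    have hrange : List.range k = 0 :: List.range' 1 (k - 1) := by
      rw [List.range_eq_range']
      have : k = (k - 1) + 1 := by omega
      rw [this, List.range'_succ]
      simp
    rw [hdiag, hrange]
    set d0 := pvDiagEntry grid 0 with hd0
    set dt := (List.range' 1 (k - 1)).map (pvDiagEntry grid) with hdt
    -- A's loop started at row 1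
    have e1 : (1 : Int) = ((1 : Nat) : Int) := by norm_num
    have e2 : ((grid.headD []).length : Int) - 2 = ((grid.headD []).length : Int) - 1 - ((1 : Nat) : Int) := by
      push_cast; ring
    rw [e1, e2, pvGo_eq grid k hk (k - 1) 1 _ _ rfl le_rfl]
    -- B's sorted diagonal
    simp only [List.map_cons]
    set d : List Int := d0 :: dt with hd
    set s := PySem.List.sorted d (fun x => x) false with hs
    have hsne : s ≠ [] := by
      rw [hs]
      intro hc
      have := (PySem.List.sorted_eq_nil_iff (xs := d) (key := fun x => x) (rev := false)).mp hc
      simp [hd] at this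
    obtain ⟨h0, t, hst⟩ : ∃ h0 t, s = h0 :: t := by
      cases hse : s with
      | nil => exact absurd hse hsne
      | cons a b => exact ⟨a, b, rfl⟩
    -- head of sorted = min of d
    have hminfold : d.min? = some (dt.foldl min d0) := List.min?_cons'
    have hminhead : d.min? = some h0 := by
      rw [List.min?_eq_some_iff]
      constructor
      · have : h0 ∈ s := by rw [hst]; exact List.mem_cons_self
        exact (PySem.List.mem_sorted d (fun x => x) false h0).mp this
      · intro b hb
        exact PySem.List.key_head_sorted_le d (fun x => x) (hs.symm.trans hst) b hb
    have hhead : h0 = dt.foldl min d0 := by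
      have := hminhead.symm.trans hminfold
      exact Option.some.inj this
    -- last of sorted = max of d
    have hmaxfold : d.max? = some (dt.foldl max d0) := List.max?_cons'
    have hlast : s.getLast hsne = dt.foldl max d0 := by
      have hmaxlast : d.max? = some (s.getLast hsne) := by
        rw [List.max?_eq_some_iff]
        constructor
        · exact (PySem.List.mem_sorted d (fun x => x) false _).mp (List.getLast_mem hsne)
        · intro b hb
          have hbs : b ∈ s := (PySem.List.mem_sorted d (fun x => x) false b).mpr hb
          have hp : s.Pairwise (· ≤ ·) := by
            have := PySem.List.sorted_pairwise (xs := d) (key := fun x => x)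
            rw [← hs] at this
            exact this
          exact pvLastGe s hp b hbs hsne
      exact Option.some.inj (hmaxlast.symm.trans hmaxfold)
    -- assemble
    have hget0 : PySem.List.pyGetD s 0 0 = h0 := by
      rw [hst]
      simp [PySem.List.pyGetD, PySem.List.pyGet?, PySem.List.pyIdx?]
    have em : (-(((1 : Nat) : Int))) = (-1 : Int) := by norm_num
    rw [hget0, em, pvGetNegOne s hsne, hhead, hlast]
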